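-- pv_equiv track=rewrite | github.com/star14ms/Rosalind | Bioinformatics_Textbook_Track/_25_BA3C.py | construct_overlap_graph
-- ===== SOURCE A (Python) =====
-- def construct_overlap_graph(k_mers):
--     graph = []
--     while k_mers:
--         k_mer = k_mers.pop(0)
--         for k_mer2 in k_mers:
--             if k_mer[1:] == k_mer2[:-1]:
--                 graph.append(f"{k_mer} -> {k_mer2}")
--             if k_mer2[1:] == k_mer[:-1]:
--                 graph.append(f"{k_mer2} -> {k_mer}")
--
--     return '\n'.join(graph)
-- ===== SOURCE B (Python) =====
-- def construct_overlap_graph(k_mers):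
--     # Index k-mers by prefix and by suffix once; per node, merge the two
--     # hash-bucket candidate lists in index order (forward edge first on ties).
--     pref = {}
--     suf = {}
--     for j, k in enumerate(k_mers):
--         pref.setdefault(k[:-1], []).append((j, k))
--         suf.setdefault(k[1:], []).append((j, k))
--     out = []
--     for i, k in enumerate(k_mers):
--         fwd = [q for q in pref.get(k[1:], []) if i < q[0]]
--         bwd = [q for q in suf.get(k[:-1], []) if i < q[0]]
--         a = b = 0
--         while a < len(fwd) or b < len(bwd):
--             if b == len(bwd) or (a < len(fwd) and fwd[a][0] <= bwd[b][0]):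
--                 out.append(f"{k} -> {fwd[a][1]}"); a += 1
--             else:
--                 out.append(f"{bwd[b][1]} -> {k}"); b += 1
--     return '\n'.join(out)
-- ===== Notes on version B (the rewrite author's own statement) =====
-- stated objective: faster
-- what changed: Replaces A's all-pairs suffix/prefix scan (destructive pop(0) loop) with one pass that hash-indexes k-mers by prefix and by suffix, then per node merges the two bucket candidate lists in index order (forward edge first on ties).
import Mathlib
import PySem

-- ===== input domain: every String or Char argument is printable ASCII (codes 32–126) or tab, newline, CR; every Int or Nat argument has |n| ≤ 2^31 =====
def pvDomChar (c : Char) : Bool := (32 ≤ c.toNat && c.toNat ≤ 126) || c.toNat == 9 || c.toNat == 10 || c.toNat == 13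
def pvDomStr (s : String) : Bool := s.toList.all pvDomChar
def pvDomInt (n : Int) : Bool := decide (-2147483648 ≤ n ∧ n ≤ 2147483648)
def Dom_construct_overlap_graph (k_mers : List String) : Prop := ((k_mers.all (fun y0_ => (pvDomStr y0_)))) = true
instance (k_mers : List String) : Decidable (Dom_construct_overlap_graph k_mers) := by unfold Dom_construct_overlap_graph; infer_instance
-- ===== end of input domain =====

-- B indexes the k-mers by prefix and by suffix in dicts and merges per-node candidate
-- buckets in index order instead of A's all-pairs scan; equivalence is about the RETURN
-- value only (Python A empties its argument list via pop(0), B does not mutate it).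

-- shared tiny expression helpers (k[1:], k[:-1], the f-string)
def pvSuf (s : String) : String := PySem.Str.slice s (some 1) none
def pvPre (s : String) : String := PySem.Str.slice s none (some (-1))
def pvFmt (a b : String) : String := a ++ " -> " ++ b

-- ===== PORT A =====
-- while k_mers: k_mer = k_mers.pop(0); for k_mer2 in k_mers: …  (graph is the accumulator)
def pvGoA (k_mers graph : List String) : List String :=
  match k_mers with
  | [] => graph
  | k :: rest =>
      pvGoA rest (rest.foldl (fun g k2 =>
        let g := if pvSuf k == pvPre k2 then g ++ [pvFmt k k2] else g
        if pvSuf k2 == pvPre k then g ++ [pvFmt k2 k] else g) graph)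

def construct_overlap_graph (k_mers : List String) : String :=
  PySem.Str.join "\n" (pvGoA k_mers [])

-- ===== PORT B =====
-- pref.setdefault(k[:-1], []).append((j, k)); suf.setdefault(k[1:], []).append((j, k))
def pvBuild (k_mers : List String) :
    PySem.Dict String (List (Int × String)) × PySem.Dict String (List (Int × String)) :=
  (PySem.List.enumerate k_mers 0).foldl
    (fun pd p =>
      (pd.1.insert (pvPre p.2) (pd.1.getD (pvPre p.2) [] ++ [p]),
       pd.2.insert (pvSuf p.2) (pd.2.getD (pvSuf p.2) [] ++ [p])))
    (PySem.Dict.empty, PySem.Dict.empty)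

-- the while-loop over cursors a, b, as structural recursion on the two candidate lists
def pvMerge (k : String) : List (Int × String) → List (Int × String) → List String
  | [], [] => []
  | f :: fs, [] => pvFmt k f.2 :: pvMerge k fs []
  | [], b :: bs => pvFmt b.2 k :: pvMerge k [] bs
  | f :: fs, b :: bs =>
      if f.1 ≤ b.1 then pvFmt k f.2 :: pvMerge k fs (b :: bs)
      else pvFmt b.2 k :: pvMerge k (f :: fs) bs

def construct_overlap_graph_alt (k_mers : List String) : String :=
  let pd := pvBuild k_mers
  let out := (PySem.List.enumerate k_mers 0).foldl (fun out p =>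
    let fwd := (pd.1.getD (pvSuf p.2) []).filter (fun q => p.1 < q.1)
    let bwd := (pd.2.getD (pvPre p.2) []).filter (fun q => p.1 < q.1)
    out ++ pvMerge p.2 fwd bwd) []
  PySem.Str.join "\n" out

-- ===== PRECONDITION & SPEC =====
def Spec_construct_overlap_graph (k_mers : List String) (out : String) : Prop := out = construct_overlap_graph_alt k_mers
instance (k_mers : List String) (out : String) : Decidable (Spec_construct_overlap_graph k_mers out) := by unfold Spec_construct_overlap_graph; infer_instance

-- ===== CLAIM (what is proved, stated in full; the proofs are below) =====
def Claim_equal_construct_overlap_graph : Prop := ∀ (k_mers : List String), Dom_construct_overlap_graph k_mers → Spec_construct_overlap_graph k_mers (construct_overlap_graph k_mers)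

-- ===== LEMMAS AND PROOFS =====

-- A's per-node edge contribution and its edge list
def pvInner (k : String) (r : List String) : List String :=
  r.flatMap (fun k2 =>
    (if pvSuf k == pvPre k2 then [pvFmt k k2] else []) ++
    (if pvSuf k2 == pvPre k then [pvFmt k2 k] else []))

def pvEdges : List String → List String
  | [] => []
  | k :: r => pvInner k r ++ pvEdges r

lemma pvInner_foldl (k : String) (r : List String) (g : List String) :
    r.foldl (fun g k2 =>
      let g := if pvSuf k == pvPre k2 then g ++ [pvFmt k k2] else g
      if pvSuf k2 == pvPre k then g ++ [pvFmt k2 k] else g) g = g ++ pvInner k r := by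
  induction r generalizing g with
  | nil => simp [pvInner]
  | cons x xs ih =>
      simp only [List.foldl_cons, pvInner, List.flatMap_cons] at *
      rw [ih]
      split_ifs <;> simp

lemma pvGoA_eq (l g : List String) : pvGoA l g = g ++ pvEdges l := by
  induction l generalizing g with
  | nil => simp [pvGoA, pvEdges]
  | cons k r ih => rw [pvGoA, pvInner_foldl, ih, pvEdges, List.append_assoc]

-- characterisation of the two dicts built by B
lemma pvBuild_getD (km : List String) (key : String) :
    ((pvBuild km).1.getD key [] =
      (PySem.List.enumerate km 0).filter (fun q => key == pvPre q.2)) ∧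
    ((pvBuild km).2.getD key [] =
      (PySem.List.enumerate km 0).filter (fun q => key == pvSuf q.2)) := by
  unfold pvBuild
  generalize PySem.List.enumerate km 0 = l
  have h : ∀ (l : List (Int × String)) (d1 d2 : PySem.Dict String (List (Int × String))),
      ((l.foldl (fun pd p =>
        (pd.1.insert (pvPre p.2) (pd.1.getD (pvPre p.2) [] ++ [p]),
         pd.2.insert (pvSuf p.2) (pd.2.getD (pvSuf p.2) [] ++ [p]))) (d1, d2)).1.getD key []
        = d1.getD key [] ++ l.filter (fun q => key == pvPre q.2)) ∧
      ((l.foldl (fun pd p =>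
        (pd.1.insert (pvPre p.2) (pd.1.getD (pvPre p.2) [] ++ [p]),
         pd.2.insert (pvSuf p.2) (pd.2.getD (pvSuf p.2) [] ++ [p]))) (d1, d2)).2.getD key []
        = d2.getD key [] ++ l.filter (fun q => key == pvSuf q.2)) := by
    intro l
    induction l with
    | nil => intro d1 d2; simp
    | cons p ps ih =>
        intro d1 d2
        simp only [List.foldl_cons, List.filter_cons]
        rcases ih (d1.insert (pvPre p.2) (d1.getD (pvPre p.2) [] ++ [p]))
                  (d2.insert (pvSuf p.2) (d2.getD (pvSuf p.2) [] ++ [p])) with ⟨h1, h2⟩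
        constructor
        · rw [h1, PySem.Dict.getD_insert]
          by_cases hk : key = pvPre p.2
          · simp [hk]
          · simp [hk, beq_iff_eq]
        · rw [h2, PySem.Dict.getD_insert]
          by_cases hk : key = pvSuf p.2
          · simp [hk]
          · simp [hk, beq_iff_eq]
  have := h l PySem.Dict.empty PySem.Dict.empty
  simpa using this

-- equation lemmas for pvMerge
lemma pvMerge_nil_nil (k : String) : pvMerge k [] [] = [] := by rw [pvMerge]

lemma pvMerge_cons_nil (k : String) (f : Int × String) (fs : List (Int × String)) :
    pvMerge k (f :: fs) [] = pvFmt k f.2 :: pvMerge k fs [] := by rw [pvMerge]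

lemma pvMerge_nil_cons (k : String) (b : Int × String) (bs : List (Int × String)) :
    pvMerge k [] (b :: bs) = pvFmt b.2 k :: pvMerge k [] bs := by rw [pvMerge]

lemma pvMerge_cons_cons (k : String) (f b : Int × String) (fs bs : List (Int × String)) :
    pvMerge k (f :: fs) (b :: bs) =
      if f.1 ≤ b.1 then pvFmt k f.2 :: pvMerge k fs (b :: bs)
      else pvFmt b.2 k :: pvMerge k (f :: fs) bs := by rw [pvMerge]

-- one merge step when the back candidate has the smallest index
lemma pvMerge_bwd_head (k : String) (fs : List (Int × String)) (b : Int × String)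
    (bs : List (Int × String)) (hb : ∀ f ∈ fs, b.1 < f.1) :
    pvMerge k fs (b :: bs) = pvFmt b.2 k :: pvMerge k fs bs := by
  cases fs with
  | nil => rw [pvMerge_nil_cons]
  | cons f fs' =>
      have : ¬ f.1 ≤ b.1 := by have := hb f (by simp); omega
      rw [pvMerge_cons_cons, if_neg this]

-- merging the two filtered sub-lists of a strictly index-sorted list
lemma pvMerge_filter (k : String) (l : List (Int × String))
    (hl : l.Pairwise (fun p q => p.1 < q.1)) (P Q : Int × String → Bool) :
    pvMerge k (l.filter P) (l.filter Q) =
      l.flatMap (fun q =>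
        (if P q then [pvFmt k q.2] else []) ++ (if Q q then [pvFmt q.2 k] else [])) := by
  induction l with
  | nil => simp [pvMerge_nil_nil]
  | cons p ps ih =>
      have hp : ∀ q ∈ ps, p.1 < q.1 := (List.pairwise_cons.mp hl).1
      have hps := (List.pairwise_cons.mp hl).2
      have hfs : ∀ f ∈ ps.filter P, p.1 < f.1 := fun f hf => hp f (List.mem_of_mem_filter hf)
      simp only [List.filter_cons, List.flatMap_cons]
      cases hP : P p <;> cases hQ : Q p <;>
        simp only [if_true, if_false, Bool.false_eq_true]
      · rw [ih hps]; simp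
      · -- only backward
        rw [pvMerge_bwd_head k _ p _ hfs, ih hps]; simp
      · -- only forward
        cases hQf : ps.filter Q with
        | nil =>
            have h2 := ih hps
            rw [hQf] at h2
            rw [pvMerge_cons_nil, h2]; simp
        | cons b bs =>
            have hbm : b ∈ ps.filter Q := by rw [hQf]; simp
            have hb : p.1 < b.1 := hp b (List.mem_of_mem_filter hbm)
            rw [pvMerge_cons_cons, if_pos (le_of_lt hb), ← hQf, ih hps]
            simp
      · -- both: forward edge first (equal head indices), then the backward edge
        rw [pvMerge_cons_cons, if_pos (le_refl p.1),
          pvMerge_bwd_head k _ p _ hfs, ih hps]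
        simp

-- the heart: the per-node flatMap over later entries equals A's edge list
lemma pvKey (km : List String) (s : Int) :
    (PySem.List.enumerate km s).flatMap (fun p =>
        pvInner p.2 ((((PySem.List.enumerate km s).filter (fun q => decide (p.1 < q.1)))).map (·.2)))
      = pvEdges km := by
  induction km generalizing s with
  | nil => simp [PySem.List.enumerate_nil, pvEdges]
  | cons k r ih =>
      rw [PySem.List.enumerate_cons, List.flatMap_cons, pvEdges]
      congr 1
      · -- head contribution: its later entries are exactly r
        have h1 : List.filter (fun q => decide ((s, k).1 < q.1))
            ((s, k) :: PySem.List.enumerate r (s + 1)) = PySem.List.enumerate r (s + 1) := by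
          rw [List.filter_cons]
          have h0 : decide ((s, k).1 < (s, k).1) = false := by simp
          rw [h0, if_neg (by simp)]
          apply List.filter_eq_self.mpr
          intro q hq
          rcases (PySem.List.mem_enumerate_iff _ _ _).mp hq with ⟨j, hj, rfl⟩
          simp; omega
        rw [h1, PySem.List.map_snd_enumerate]
      · -- tail: the head entry never survives the filter for later p
        rw [← ih (s + 1)]
        apply List.flatMap_congr
        intro p hp
        rcases (PySem.List.mem_enumerate_iff _ _ _).mp hp with ⟨j, hj, rfl⟩
        rw [List.filter_cons]
        have h2 : decide ((s + 1 + (j : Nat), r[j]).1 < (s, k).1) = false := by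
          simp; omega
        rw [h2, if_neg (by simp)]

-- B's edge list equals A's edge list
lemma pvAlt_out (km : List String) :
    construct_overlap_graph_alt km = PySem.Str.join "\n" (pvEdges km) := by
  simp only [construct_overlap_graph_alt]
  congr 1
  rw [PySem.List.foldl_append_eq_flatMap, List.nil_append, ← pvKey km 0]
  apply List.flatMap_congr
  intro p hp
  rw [(pvBuild_getD km (pvSuf p.2)).1, (pvBuild_getD km (pvPre p.2)).2,
    List.filter_comm (fun q => decide (p.1 < q.1)) (fun q => pvSuf p.2 == pvPre q.2)
      (PySem.List.enumerate km 0),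
    List.filter_comm (fun q => decide (p.1 < q.1)) (fun q => pvPre p.2 == pvSuf q.2)
      (PySem.List.enumerate km 0)]
  have hpair : ((PySem.List.enumerate km 0).filter (fun q => decide (p.1 < q.1))).Pairwise
      (fun a b => a.1 < b.1) := (PySem.List.pairwise_lt_enumerate km 0).filter _
  rw [pvMerge_filter p.2 _ hpair]
  rw [pvInner, List.flatMap_map]
  apply List.flatMap_congr
  intro q _
  congr 1
  have : (pvPre p.2 == pvSuf q.2) = (pvSuf q.2 == pvPre p.2) := by
    simp [eq_comm]
  rw [this]

-- ===== VERDICT (by name: the statement is the Claim_ definition above) =====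
theorem construct_overlap_graph_spec : Claim_equal_construct_overlap_graph := by
  intro km _
  show construct_overlap_graph km = construct_overlap_graph_alt km
  rw [pvAlt_out, construct_overlap_graph, pvGoA_eq, List.nil_append]
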